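-- pv_equiv track=rewrite | github.com/lucasbui92/admissions-nlp-pipeline | prep/add_subject_mappings.py | add_related_terms
-- ===== SOURCE A (Python) =====
-- STOPWORDS = {
--     "and", "or", "with", "of", "in", "the", "a", "an",
--     "science", "sciences", "studies",
-- }
--
-- def meaningful_words(text):
--     """Return the set of significant words in a string, excluding stopwords."""
--     return {
--         w for w in text.lower().replace(",", " ").split()
--         if w not in STOPWORDS and len(w) > 2
--     }
--
-- def shares_keyword(subject, course_title):
--     """True if subject and course title share at least one meaningful word."""
--     return bool(meaningful_words(subject) & meaningful_words(course_title))
--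
-- def add_related_terms(subjects, course_titles, manual_mappings):
--     """
--     For each subject, produce a merged list of related terms from:
--       - keyword matching against course_titles (any course sharing a meaningful
--         word with the subject is included)
--       - manually curated terms in manual_mappings
--
--     Rules:
--     - Exact match (case-insensitive) between course title and subject is skipped.
--     - A course is included if it shares at least one meaningful word with the
--       subject (excluding stopwords such as 'science', 'studies', 'and', etc.).
--     - Duplicates across both sources are removed.
--     - Final list is sorted alphabetically.
--     """
--     lower_to_original = {t.lower(): t for t in course_titles}
--
--     result = {}
--     for subject in subjects:
--         seen_lower = set()
--         merged = []
--         subject_lower = subject.lower()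
--
--         # -- keyword matches --
--         for title_lower, original in lower_to_original.items():
--             if title_lower == subject_lower:
--                 continue
--             if not shares_keyword(subject_lower, title_lower):
--                 continue
--             if title_lower not in seen_lower:
--                 merged.append(original)
--                 seen_lower.add(title_lower)
--
--         # -- manual terms (from subject_mappings.py) --
--         for term in manual_mappings.get(subject, []):
--             term_lower = term.lower()
--             if term_lower == subject_lower:
--                 continue
--             if term_lower not in seen_lower:
--                 merged.append(term)
--                 seen_lower.add(term_lower)
--
--         result[subject] = sorted(merged)
--     return result
-- ===== SOURCE B (Python) =====
-- STOPWORDS = {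
--     "and", "or", "with", "of", "in", "the", "a", "an",
--     "science", "sciences", "studies",
-- }
--
-- def meaningful_words(text):
--     """Return the set of significant words in a string, excluding stopwords."""
--     return {
--         w for w in text.lower().replace(",", " ").split()
--         if w not in STOPWORDS and len(w) > 2
--     }
--
-- def add_related_terms(subjects, course_titles, manual_mappings):
--     """
--     Same result as the pairwise version, but via an inverted word->titles
--     index: each subject looks up only its own words instead of scanning
--     every course title.
--     """
--     lower_to_original = {t.lower(): t for t in course_titles}
--
--     # invert: meaningful word -> set of course titles (lowercased) containing it
--     word_index = {}
--     for title_lower in lower_to_original: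
--         for w in meaningful_words(title_lower):
--             word_index.setdefault(w, set()).add(title_lower)
--
--     result = {}
--     for subject in subjects:
--         subject_lower = subject.lower()
--
--         matched = set()
--         for w in meaningful_words(subject_lower):
--             matched |= word_index.get(w, set())
--         matched.discard(subject_lower)
--
--         merged = [lower_to_original[tl] for tl in matched]
--         seen_lower = set(matched)
--         for term in manual_mappings.get(subject, []):
--             term_lower = term.lower()
--             if term_lower != subject_lower and term_lower not in seen_lower:
--                 merged.append(term)
--                 seen_lower.add(term_lower)
--
--         result[subject] = sorted(merged)
--     return result
-- ===== Notes on version B (the rewrite author's own statement) =====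
-- stated objective: faster
-- what changed: Instead of testing every subject against every course title with a pairwise meaningful-word intersection, B builds an inverted word->titles index once and each subject unions only the index entries of its own words, then merges manual terms as before.
import Mathlib
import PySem

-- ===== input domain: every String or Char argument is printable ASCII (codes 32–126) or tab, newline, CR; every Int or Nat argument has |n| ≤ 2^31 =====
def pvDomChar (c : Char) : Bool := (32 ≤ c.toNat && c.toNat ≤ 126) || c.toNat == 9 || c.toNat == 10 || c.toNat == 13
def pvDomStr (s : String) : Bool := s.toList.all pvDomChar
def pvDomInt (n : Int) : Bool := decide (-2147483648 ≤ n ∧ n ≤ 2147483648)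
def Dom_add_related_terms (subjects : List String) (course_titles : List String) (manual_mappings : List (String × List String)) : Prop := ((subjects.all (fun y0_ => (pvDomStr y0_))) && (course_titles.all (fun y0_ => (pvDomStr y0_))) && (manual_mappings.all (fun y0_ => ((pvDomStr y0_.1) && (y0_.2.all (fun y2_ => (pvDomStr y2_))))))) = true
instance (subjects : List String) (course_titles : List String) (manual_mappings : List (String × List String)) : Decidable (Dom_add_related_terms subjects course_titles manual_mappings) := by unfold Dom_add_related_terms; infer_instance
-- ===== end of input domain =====

-- B replaces A's per-subject scan over every course title with an inverted word -> titles
-- index built once, so each subject only unions the index entries of its own words (objective: faster).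

-- ===== PORT A =====
def STOPWORDS : PySem.Set String := PySem.Set.ofList
  ["and", "or", "with", "of", "in", "the", "a", "an", "science", "sciences", "studies"]

def meaningful_words (text : String) : PySem.Set String :=
  PySem.Set.ofList
    (((PySem.Str.split₀ (PySem.Str.replace (PySem.Str.lower text) "," " ")).filter
      (fun w => !(STOPWORDS.contains w) && decide (2 < PySem.Str.len w))))

def shares_keyword (subject : String) (course_title : String) : Bool :=
  !(PySem.Set.inter (meaningful_words subject) (meaningful_words course_title)).isEmpty

-- manual_mappings.get(subject, []) on the dict parameter (assoc list, first match)
def pvGetMM (mm : List (String × List String)) (s : String) : List String :=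
  ((mm.find? (fun p => p.1 == s)).map (·.2)).getD []

def add_related_terms (subjects : List String) (course_titles : List String) (manual_mappings : List (String × List String)) : List (String × List String) :=
  let lower_to_original : PySem.Dict String String :=
    course_titles.foldl (fun d t => d.insert (PySem.Str.lower t) t) PySem.Dict.empty
  let result : PySem.Dict String (List String) :=
    subjects.foldl (fun result subject =>
      let subject_lower := PySem.Str.lower subject
      -- keyword matches: state = (seen_lower, merged)
      let st := lower_to_original.items.foldl
        (fun (st : PySem.Set String × List String) p =>
          if p.1 == subject_lower then st
          else if !(shares_keyword subject_lower p.1) then st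
          else if st.1.contains p.1 then st
          else (st.1.add p.1, st.2 ++ [p.2]))
        (PySem.Set.empty, [])
      -- manual terms
      let st := (pvGetMM manual_mappings subject).foldl
        (fun (st : PySem.Set String × List String) term =>
          let term_lower := PySem.Str.lower term
          if term_lower == subject_lower then st
          else if st.1.contains term_lower then st
          else (st.1.add term_lower, st.2 ++ [term]))
        st
      result.insert subject (PySem.List.sorted st.2 (fun x => x) false))
      PySem.Dict.empty
  result.items

-- ===== PORT B =====
def buildWordIndex (title_lowers : List String) : PySem.Dict String (PySem.Set String) :=
  title_lowers.foldl
    (fun idx tl =>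
      (meaningful_words tl).foldl
        (fun idx w => idx.modify w PySem.Set.empty (fun s => s.add tl)) idx)
    PySem.Dict.empty

def add_related_terms_alt (subjects : List String) (course_titles : List String) (manual_mappings : List (String × List String)) : List (String × List String) :=
  let lower_to_original : PySem.Dict String String :=
    course_titles.foldl (fun d t => d.insert (PySem.Str.lower t) t) PySem.Dict.empty
  let word_index := buildWordIndex lower_to_original.keys
  let result : PySem.Dict String (List String) :=
    subjects.foldl (fun result subject =>
      let subject_lower := PySem.Str.lower subject
      let matched : PySem.Set String :=
        (meaningful_words subject_lower).foldl
          (fun acc w => acc.union (word_index.getD w PySem.Set.empty)) PySem.Set.empty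
      let matched := matched.discard subject_lower
      -- lower_to_original[tl]: tl is always a key of lower_to_original, so getD is exact
      let merged : List String := matched.map (fun tl => lower_to_original.getD tl "")
      let st := (pvGetMM manual_mappings subject).foldl
        (fun (st : PySem.Set String × List String) term =>
          let term_lower := PySem.Str.lower term
          if term_lower != subject_lower && !(st.1.contains term_lower) then
            (st.1.add term_lower, st.2 ++ [term])
          else st)
        (matched, merged)
      result.insert subject (PySem.List.sorted st.2 (fun x => x) false))
      PySem.Dict.empty
  result.items

-- ===== PRECONDITION & SPEC =====
def Spec_add_related_terms (subjects : List String) (course_titles : List String) (manual_mappings : List (String × List String)) (out : List (String × List String)) : Prop := out = add_related_terms_alt subjects course_titles manual_mappings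
instance (subjects : List String) (course_titles : List String) (manual_mappings : List (String × List String)) (out : List (String × List String)) : Decidable (Spec_add_related_terms subjects course_titles manual_mappings out) := by unfold Spec_add_related_terms; infer_instance

-- ===== CLAIM (what is proved, stated in full; the proofs are below) =====
def Claim_equal_add_related_terms : Prop := ∀ (subjects : List String) (course_titles : List String) (manual_mappings : List (String × List String)), Dom_add_related_terms subjects course_titles manual_mappings → Spec_add_related_terms subjects course_titles manual_mappings (add_related_terms subjects course_titles manual_mappings)

-- ===== LEMMAS AND PROOFS =====
-- pvKeep: the keep-condition of A's title loop
def pvKeep (sl k : String) : Bool := !(k == sl) && shares_keyword sl k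

theorem shares_iff (a b : String) :
    shares_keyword a b = true ↔ ∃ w, w ∈ meaningful_words a ∧ w ∈ meaningful_words b := by
  unfold shares_keyword
  rw [Bool.not_eq_eq_eq_not, Bool.not_true, List.isEmpty_eq_false_iff_exists_mem]
  constructor
  · rintro ⟨w, hw⟩; exact ⟨w, (PySem.Set.mem_inter _ _ _).1 hw⟩
  · rintro ⟨w, hw⟩; exact ⟨w, (PySem.Set.mem_inter _ _ _).2 hw⟩

-- membership through the inner index-building fold (over the words of one title)
theorem mem_getD_inner (ws : List String) (idx : PySem.Dict String (PySem.Set String))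
    (tl w x : String) :
    x ∈ (ws.foldl (fun idx w => PySem.Dict.modify idx w PySem.Set.empty (fun s => s.add tl)) idx).getD w PySem.Set.empty
      ↔ x ∈ idx.getD w PySem.Set.empty ∨ (x = tl ∧ w ∈ ws) := by
  induction ws generalizing idx with
  | nil => simp
  | cons w' ws ih =>
    simp only [List.foldl_cons, ih, List.mem_cons]
    by_cases h : w = w'
    · subst h
      rw [PySem.Dict.getD_modify_self, PySem.Set.mem_add]
      tauto
    · rw [PySem.Dict.getD_modify_of_ne _ _ _ h]
      tauto

theorem mem_getD_buildWordIndex (keys : List String) (w x : String) :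
    x ∈ (buildWordIndex keys).getD w PySem.Set.empty ↔ x ∈ keys ∧ w ∈ meaningful_words x := by
  suffices h : ∀ (idx : PySem.Dict String (PySem.Set String)), x ∈ (keys.foldl (fun idx tl =>
      (meaningful_words tl).foldl (fun idx w => PySem.Dict.modify idx w PySem.Set.empty (fun s => s.add tl)) idx) idx).getD w PySem.Set.empty
      ↔ x ∈ idx.getD w PySem.Set.empty ∨ (x ∈ keys ∧ w ∈ meaningful_words x) by
    have h0 := h PySem.Dict.empty
    unfold buildWordIndex
    rw [h0]
    have he : ((PySem.Dict.empty : PySem.Dict String (PySem.Set String)).getD w PySem.Set.empty)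
        = ([] : List String) := rfl
    rw [he]
    simp
  intro idx
  induction keys generalizing idx with
  | nil => simp
  | cons k ks ih =>
    rw [List.foldl_cons, ih, mem_getD_inner]
    simp only [List.mem_cons]
    constructor
    · rintro ((h | ⟨rfl, h⟩) | ⟨h1, h2⟩)
      · exact Or.inl h
      · exact Or.inr ⟨Or.inl rfl, h⟩
      · exact Or.inr ⟨Or.inr h1, h2⟩
    · rintro (h | ⟨(rfl | h1), h2⟩)
      · exact Or.inl (Or.inl h)
      · exact Or.inl (Or.inr ⟨rfl, h2⟩)
      · exact Or.inr ⟨h1, h2⟩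

-- membership through B's union fold
theorem mem_matched_fold (ws : List String) (idx : PySem.Dict String (PySem.Set String))
    (acc : PySem.Set String) (x : String) :
    x ∈ ws.foldl (fun acc w => acc.union (idx.getD w PySem.Set.empty)) acc
      ↔ x ∈ acc ∨ ∃ w ∈ ws, x ∈ idx.getD w PySem.Set.empty := by
  induction ws generalizing acc with
  | nil => simp
  | cons w ws ih =>
    simp only [List.foldl_cons, ih, PySem.Set.mem_union, List.mem_cons]
    constructor
    · rintro ((h | h) | ⟨w', h1, h2⟩)
      · tauto
      · exact Or.inr ⟨w, Or.inl rfl, h⟩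
      · exact Or.inr ⟨w', Or.inr h1, h2⟩
    · rintro (h | ⟨w', (rfl | h1), h2⟩)
      · tauto
      · tauto
      · exact Or.inr ⟨w', h1, h2⟩

theorem nodup_matched_fold (ws : List String) (idx : PySem.Dict String (PySem.Set String))
    (acc : PySem.Set String) (h : acc.Nodup) :
    (ws.foldl (fun acc w => acc.union (idx.getD w PySem.Set.empty)) acc).Nodup := by
  induction ws generalizing acc with
  | nil => exact h
  | cons w ws ih => exact ih _ (PySem.Set.nodup_union _ _ h)

-- A's title loop is filter + map when the item keys are distinct and unseen
theorem titles_fold_eq (sl : String) (items : List (String × String))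
    (st : PySem.Set String × List String)
    (hnd : (items.map (·.1)).Nodup) (hdis : ∀ p ∈ items, ¬ p.1 ∈ st.1) :
    items.foldl (fun (st : PySem.Set String × List String) p =>
        if p.1 == sl then st
        else if !(shares_keyword sl p.1) then st
        else if st.1.contains p.1 then st
        else (st.1.add p.1, st.2 ++ [p.2])) st
      = (((items.filter (fun p => pvKeep sl p.1)).map (·.1)).foldl PySem.Set.add st.1,
         st.2 ++ (items.filter (fun p => pvKeep sl p.1)).map (·.2)) := by
  induction items generalizing st with
  | nil => simp
  | cons p ps ih =>
    simp only [List.map_cons, List.nodup_cons] at hnd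
    have hdisp : ∀ q ∈ ps, ¬ q.1 ∈ st.1 := fun q hq => hdis q (List.mem_cons_of_mem _ hq)
    rw [List.foldl_cons, List.filter_cons]
    by_cases h1 : p.1 = sl
    · rw [if_pos (by simpa using h1), if_neg (by simp [pvKeep, h1])]
      exact ih st hnd.2 hdisp
    · by_cases h2 : shares_keyword sl p.1 = true
      · have hc : st.1.contains p.1 = false := by
          rw [← Bool.not_eq_true, PySem.Set.contains_iff]
          exact hdis p (List.mem_cons_self)
        rw [if_neg (by simpa using h1), if_neg (by rw [h2]; simp),
          if_neg (by rw [hc]; exact Bool.false_ne_true), if_pos (by simp [pvKeep, h1, h2])]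
        rw [ih (st.1.add p.1, st.2 ++ [p.2]) hnd.2 ?_]
        · simp [List.append_assoc]
        · intro q hq hmem
          rcases (PySem.Set.mem_add _ _ _).1 hmem with h | h
          · exact hdisp q hq h
          · exact hnd.1 (h ▸ (List.mem_map_of_mem hq))
      · rw [Bool.not_eq_true] at h2
        rw [if_neg (by simpa using h1), if_pos (by rw [h2]; simp), if_neg (by simp [pvKeep, h2])]
        exact ih st hnd.2 hdisp

theorem mem_foldl_add (l : List String) (s : PySem.Set String) (x : String) :
    x ∈ l.foldl PySem.Set.add s ↔ x ∈ s ∨ x ∈ l := by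
  induction l generalizing s with
  | nil => simp
  | cons y l ih => simp only [List.foldl_cons, ih, PySem.Set.mem_add, List.mem_cons]; tauto

-- the manual-terms loops of A and B agree whenever the seen sets agree as sets
theorem manual_fold_eq (sl : String) (terms : List String) :
    ∀ (s1 s2 : PySem.Set String) (m1 m2 : List String),
    (∀ x, x ∈ s1 ↔ x ∈ s2) →
    ∃ r,
      (terms.foldl (fun (st : PySem.Set String × List String) term =>
          if PySem.Str.lower term == sl then st
          else if st.1.contains (PySem.Str.lower term) then st
          else (st.1.add (PySem.Str.lower term), st.2 ++ [term])) (s1, m1)).2 = m1 ++ r ∧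
      (terms.foldl (fun (st : PySem.Set String × List String) term =>
          if PySem.Str.lower term != sl && !(st.1.contains (PySem.Str.lower term)) then
            (st.1.add (PySem.Str.lower term), st.2 ++ [term])
          else st) (s2, m2)).2 = m2 ++ r := by
  induction terms with
  | nil => intro s1 s2 m1 m2 _; exact ⟨[], by simp, by simp⟩
  | cons t ts ih =>
    intro s1 s2 m1 m2 hs
    have hceq : s1.contains (PySem.Str.lower t) = s2.contains (PySem.Str.lower t) := by
      rw [Bool.eq_iff_iff, PySem.Set.contains_iff, PySem.Set.contains_iff]
      exact hs _
    simp only [List.foldl_cons]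
    by_cases h1 : PySem.Str.lower t = sl
    · rw [if_pos (by simpa using h1), if_neg (by simp [h1])]
      exact ih s1 s2 m1 m2 hs
    · by_cases h2 : s1.contains (PySem.Str.lower t) = true
      · rw [if_neg (by simpa using h1), if_pos h2,
          if_neg (by rw [← hceq, h2]; simp)]
        exact ih s1 s2 m1 m2 hs
      · rw [Bool.not_eq_true] at h2
        rw [if_neg (by simpa using h1), if_neg (by rw [h2]; exact Bool.false_ne_true),
          if_pos (by rw [← hceq, h2]; simp [h1])]
        obtain ⟨r, hr1, hr2⟩ := ih (s1.add (PySem.Str.lower t)) (s2.add (PySem.Str.lower t))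
          (m1 ++ [t]) (m2 ++ [t]) (by intro x; rw [PySem.Set.mem_add, PySem.Set.mem_add, hs x])
        exact ⟨t :: r, by simpa [List.append_assoc] using hr1,
          by simpa [List.append_assoc] using hr2⟩


-- the per-subject value computed by A equals the one computed by B
theorem per_subject (cts : List String) (mm : List (String × List String)) (subject : String) :
    PySem.List.sorted
      ((pvGetMM mm subject).foldl
        (fun (st : PySem.Set String × List String) term =>
          if PySem.Str.lower term == PySem.Str.lower subject then st
          else if st.1.contains (PySem.Str.lower term) then st
          else (st.1.add (PySem.Str.lower term), st.2 ++ [term]))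
        ((cts.foldl (fun d t => d.insert (PySem.Str.lower t) t) PySem.Dict.empty).items.foldl
          (fun (st : PySem.Set String × List String) p =>
            if p.1 == PySem.Str.lower subject then st
            else if !(shares_keyword (PySem.Str.lower subject) p.1) then st
            else if st.1.contains p.1 then st
            else (st.1.add p.1, st.2 ++ [p.2]))
          (PySem.Set.empty, []))).2 (fun x => x) false
    = PySem.List.sorted
      ((pvGetMM mm subject).foldl
        (fun (st : PySem.Set String × List String) term =>
          if PySem.Str.lower term != PySem.Str.lower subject && !(st.1.contains (PySem.Str.lower term)) then
            (st.1.add (PySem.Str.lower term), st.2 ++ [term])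
          else st)
        (((meaningful_words (PySem.Str.lower subject)).foldl
            (fun acc w => acc.union ((buildWordIndex
              (cts.foldl (fun d t => d.insert (PySem.Str.lower t) t) PySem.Dict.empty).keys).getD w PySem.Set.empty))
            PySem.Set.empty).discard (PySem.Str.lower subject),
         (((meaningful_words (PySem.Str.lower subject)).foldl
            (fun acc w => acc.union ((buildWordIndex
              (cts.foldl (fun d t => d.insert (PySem.Str.lower t) t) PySem.Dict.empty).keys).getD w PySem.Set.empty))
            PySem.Set.empty).discard (PySem.Str.lower subject)).map
           (fun tl => (cts.foldl (fun d t => d.insert (PySem.Str.lower t) t) PySem.Dict.empty).getD tl ""))).2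
      (fun x => x) false := by
  set sl := PySem.Str.lower subject with hsl
  set lto := cts.foldl (fun d t => d.insert (PySem.Str.lower t) t)
    (PySem.Dict.empty : PySem.Dict String String) with hlto
  have hknd : lto.keys.Nodup := by
    rw [hlto]
    exact PySem.Dict.nodup_keys_foldl_insert_key cts (fun t => PySem.Str.lower t)
      (fun d t => t) PySem.Dict.empty List.nodup_nil
  have hitems : lto.items = lto.keys.map (fun k => (k, lto.getD k "")) :=
    PySem.Dict.items_eq_map_keys lto hknd ""
  have hmapfst : lto.items.map (fun p : String × String => p.1) = lto.keys := rfl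
  -- A's keyword loop, as filter + map over the keys
  rw [titles_fold_eq sl lto.items (PySem.Set.empty, [])
    (by rw [hmapfst]; exact hknd) (fun p _ h => List.not_mem_nil h)]
  rw [hitems, List.filter_map, List.map_map, List.map_map]
  simp only [List.nil_append]
  -- name the two sides' data
  set g : String → String := fun k => lto.getD k "" with hg
  have hcomp2 : ((fun p : String × String => p.2) ∘ fun k => (k, lto.getD k "")) = g := rfl
  have hcomp1 : ((fun p : String × String => p.1) ∘ fun k => (k, lto.getD k "")) = id := rfl
  have hfilt : ((fun p : String × String => pvKeep sl p.1) ∘ fun k => (k, lto.getD k "")) =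
    (fun k => pvKeep sl k) := rfl
  rw [hcomp2, hcomp1, hfilt, List.map_id]
  set keysF := lto.keys.filter (fun k => pvKeep sl k) with hkeysF
  set matchedD := ((meaningful_words sl).foldl
      (fun acc w => acc.union ((buildWordIndex lto.keys).getD w PySem.Set.empty))
      PySem.Set.empty).discard sl with hmatchedD
  -- membership of B's matched set = membership of A's filtered keys
  have hmem : ∀ x, x ∈ matchedD ↔ x ∈ keysF := by
    intro x
    rw [hmatchedD, hkeysF, PySem.Set.mem_discard, mem_matched_fold, List.mem_filter]
    constructor
    · rintro ⟨h0 | ⟨w, hw1, hw2⟩, hne⟩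
      · exact absurd h0 (List.not_mem_nil)
      · rw [mem_getD_buildWordIndex] at hw2
        refine ⟨hw2.1, ?_⟩
        simp only [pvKeep, Bool.and_eq_true, Bool.not_eq_true', beq_eq_false_iff_ne, ne_eq]
        exact ⟨hne, (shares_iff sl x).2 ⟨w, hw1, hw2.2⟩⟩
    · rintro ⟨hk, hkeep⟩
      simp only [pvKeep, Bool.and_eq_true, Bool.not_eq_true', beq_eq_false_iff_ne, ne_eq] at hkeep
      obtain ⟨w, hw1, hw2⟩ := (shares_iff sl x).1 hkeep.2
      exact ⟨Or.inr ⟨w, hw1, (mem_getD_buildWordIndex _ _ _).2 ⟨hk, hw2⟩⟩, hkeep.1⟩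
  have hndm : matchedD.Nodup := by
    rw [hmatchedD]
    exact PySem.Set.nodup_discard _ _ (nodup_matched_fold _ _ _ List.nodup_nil)
  have hperm : (keysF.map g).Perm (matchedD.map g) :=
    ((List.perm_ext_iff_of_nodup hndm (hknd.filter _)).2 hmem).map g |>.symm
  -- both seen sets agree, so the manual loops append the same suffix
  obtain ⟨r, hr1, hr2⟩ := manual_fold_eq sl (pvGetMM mm subject)
    (List.foldl PySem.Set.add PySem.Set.empty keysF) matchedD (keysF.map g) (matchedD.map g)
    (by intro x
        rw [mem_foldl_add, hmem x]
        simp [PySem.Set.empty])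
  rw [hr1, hr2]
  exact PySem.List.sorted_eq_sorted_of_perm _ _ (fun x => x) (fun _ _ h => h)
    (hperm.append_right r)

-- the whole per-subject result dictionaries coincide
theorem fold_result_eq (cts : List String) (mm : List (String × List String)) :
    ∀ (subs : List String) (res : PySem.Dict String (List String)),
    subs.foldl (fun result subject =>
      result.insert subject (PySem.List.sorted
        ((pvGetMM mm subject).foldl
          (fun (st : PySem.Set String × List String) term =>
            if PySem.Str.lower term == PySem.Str.lower subject then st
            else if st.1.contains (PySem.Str.lower term) then st
            else (st.1.add (PySem.Str.lower term), st.2 ++ [term]))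
          ((cts.foldl (fun d t => d.insert (PySem.Str.lower t) t) PySem.Dict.empty).items.foldl
            (fun (st : PySem.Set String × List String) p =>
              if p.1 == PySem.Str.lower subject then st
              else if !(shares_keyword (PySem.Str.lower subject) p.1) then st
              else if st.1.contains p.1 then st
              else (st.1.add p.1, st.2 ++ [p.2]))
            (PySem.Set.empty, []))).2 (fun x => x) false)) res
    = subs.foldl (fun result subject =>
      result.insert subject (PySem.List.sorted
        ((pvGetMM mm subject).foldl
          (fun (st : PySem.Set String × List String) term =>
            if PySem.Str.lower term != PySem.Str.lower subject && !(st.1.contains (PySem.Str.lower term)) then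
              (st.1.add (PySem.Str.lower term), st.2 ++ [term])
            else st)
          (((meaningful_words (PySem.Str.lower subject)).foldl
              (fun acc w => acc.union ((buildWordIndex
                (cts.foldl (fun d t => d.insert (PySem.Str.lower t) t) PySem.Dict.empty).keys).getD w PySem.Set.empty))
              PySem.Set.empty).discard (PySem.Str.lower subject),
           (((meaningful_words (PySem.Str.lower subject)).foldl
              (fun acc w => acc.union ((buildWordIndex
                (cts.foldl (fun d t => d.insert (PySem.Str.lower t) t) PySem.Dict.empty).keys).getD w PySem.Set.empty))
              PySem.Set.empty).discard (PySem.Str.lower subject)).map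
             (fun tl => (cts.foldl (fun d t => d.insert (PySem.Str.lower t) t) PySem.Dict.empty).getD tl ""))).2
        (fun x => x) false)) res := by
  intro subs
  induction subs with
  | nil => intro res; rfl
  | cons s ss ih =>
    intro res
    simp only [List.foldl_cons]
    rw [per_subject cts mm s]
    exact ih _

-- ===== VERDICT (by name: the statement is the Claim_ definition above) =====
theorem add_related_terms_spec : Claim_equal_add_related_terms := by
  intro subjects course_titles manual_mappings _
  unfold Spec_add_related_terms add_related_terms add_related_terms_alt
  exact congrArg PySem.Dict.items (fold_result_eq course_titles manual_mappings subjects PySem.Dict.empty)
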